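-- pv_equiv track=rewrite | github.com/ursmal1948/polytasker | tasks/arrays/app_2_zbior_10.py | move_elements_to_the_end
-- ===== SOURCE A (Python) =====
-- def move_elements_to_the_end(numbers: list[int], indexes: list[tuple[int, int]]) -> list[int]:
--     """
--     Moves elements specified by indexes to the end of the list.
--
--     Parameters:
--         numbers (list[int]): The list of integers.
--         indexes (list[tuple[int,int]]): A list of tuples containing the indexes of elements to be moved.
--
--     Returns:
--         list[int]: A new list with elements moved to the end.
--     """
--
--     not_indexed_numbers = []
--     indexed_numbers = []
--     idx = [num for tpl in indexes for num in tpl]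
--     for i in range(len(numbers)):
--         if i in idx:
--             indexed_numbers.append(numbers[i])
--         else:
--             not_indexed_numbers.append(numbers[i])
--     return not_indexed_numbers + indexed_numbers
-- ===== SOURCE B (Python) =====
-- def move_elements_to_the_end(numbers: list[int], indexes: list[tuple[int, int]]) -> list[int]:
--     idx = {n for t in indexes for n in t}
--     order = sorted(range(len(numbers)), key=lambda i: i in idx)
--     return [numbers[i] for i in order]
-- ===== Notes on version B (the rewrite author's own statement) =====
-- stated objective: idiomatic
-- what changed: Replaced A's explicit two-bucket partition loop with an O(k)-list membership test per position by a set of indices plus one stable sort of the positions keyed on set membership (False before True), mapped back through numbers.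
import Mathlib
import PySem

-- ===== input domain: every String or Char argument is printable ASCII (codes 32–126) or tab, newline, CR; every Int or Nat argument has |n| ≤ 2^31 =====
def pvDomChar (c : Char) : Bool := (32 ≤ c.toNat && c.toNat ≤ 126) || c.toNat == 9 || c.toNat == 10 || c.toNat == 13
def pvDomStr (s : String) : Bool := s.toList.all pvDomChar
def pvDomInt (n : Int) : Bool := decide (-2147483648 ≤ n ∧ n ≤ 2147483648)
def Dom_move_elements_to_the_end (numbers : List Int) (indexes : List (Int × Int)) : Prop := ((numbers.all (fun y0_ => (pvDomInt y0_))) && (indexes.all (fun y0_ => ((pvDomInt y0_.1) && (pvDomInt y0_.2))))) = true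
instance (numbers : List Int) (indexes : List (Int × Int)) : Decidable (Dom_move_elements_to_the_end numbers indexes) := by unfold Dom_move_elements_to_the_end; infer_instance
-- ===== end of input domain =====

-- B replaces A's two-bucket partition loop (list membership test inside) by one stable sort of
-- the positions keyed on set membership — an idiomatic one-expression formulation.

-- ===== PORT A =====
def move_elements_to_the_end (numbers : List Int) (indexes : List (Int × Int)) : List Int :=
  let idx : List Int := indexes.flatMap (fun tpl => [tpl.1, tpl.2])
  let st := (PySem.List.pyRange 0 numbers.length 1).foldl
    (fun (st : List Int × List Int) i =>
      if idx.contains i then (st.1, st.2 ++ [PySem.List.pyGetD numbers i 0])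
      else (st.1 ++ [PySem.List.pyGetD numbers i 0], st.2))
    ([], [])
  st.1 ++ st.2

-- ===== PORT B =====
-- Python's bool sort key compares as an int (False = 0 < True = 1): ported as a 0/1 Int key.
def move_elements_to_the_end_alt (numbers : List Int) (indexes : List (Int × Int)) : List Int :=
  let idx : PySem.Set Int := PySem.Set.ofList (indexes.flatMap (fun tpl => [tpl.1, tpl.2]))
  let order := PySem.List.sorted (PySem.List.pyRange 0 numbers.length 1)
    (fun i => if PySem.Set.contains idx i then (1 : Int) else 0)
  order.map (fun i => PySem.List.pyGetD numbers i 0)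

-- ===== PRECONDITION & SPEC =====
def Spec_move_elements_to_the_end (numbers : List Int) (indexes : List (Int × Int)) (out : List Int) : Prop := out = move_elements_to_the_end_alt numbers indexes
instance (numbers : List Int) (indexes : List (Int × Int)) (out : List Int) : Decidable (Spec_move_elements_to_the_end numbers indexes out) := by unfold Spec_move_elements_to_the_end; infer_instance

-- ===== CLAIM (what is proved, stated in full; the proofs are below) =====
def Claim_equal_move_elements_to_the_end : Prop := ∀ (numbers : List Int) (indexes : List (Int × Int)), Dom_move_elements_to_the_end numbers indexes → Spec_move_elements_to_the_end numbers indexes (move_elements_to_the_end numbers indexes)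

-- ===== LEMMAS AND PROOFS =====

theorem insertBy_append_not_before {α : Type} (before : α → α → Bool) (x : α)
    (fs ts : List α) (hf : ∀ y ∈ fs, before x y = false) :
    PySem.List.insertBy before x (fs ++ ts) = fs ++ PySem.List.insertBy before x ts := by
  induction fs with
  | nil => simp
  | cons f fs ih =>
    simp only [List.cons_append, PySem.List.insertBy, hf f (by simp)]
    simp [ih (fun y hy => hf y (by simp [hy]))]

theorem foldl_insertBy_boolkey (p : Int → Bool) (xs fs ts : List Int)
    (hf : ∀ y ∈ fs, p y = false) (ht : ∀ y ∈ ts, p y = true) :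
    xs.foldl (fun acc x => PySem.List.insertBy
      (fun a b => decide ((if p a then (1:Int) else 0) < (if p b then (1:Int) else 0))) x acc)
      (fs ++ ts)
    = (fs ++ xs.filter (fun x => !p x)) ++ (ts ++ xs.filter p) := by
  induction xs generalizing fs ts with
  | nil => simp
  | cons x xs ih =>
    simp only [List.foldl_cons]
    by_cases hp : p x = true
    · have hnb : ∀ y ∈ fs ++ ts, (fun a b => decide ((if p a then (1:Int) else 0) < (if p b then (1:Int) else 0))) x y = false := by
        intro y _; simp [hp]; split <;> omega
      rw [PySem.List.insertBy_of_forall_not_before _ _ _ hnb]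
      have : (fs ++ ts) ++ [x] = fs ++ (ts ++ [x]) := by simp
      rw [this, ih fs (ts ++ [x]) hf
        (by intro y hy; rcases List.mem_append.1 hy with h | h
            · exact ht y h
            · simp at h; simpa [h])]
      simp [hp]
    · have hpx : p x = false := by simpa using hp
      have hstep : PySem.List.insertBy
          (fun a b => decide ((if p a then (1:Int) else 0) < (if p b then (1:Int) else 0))) x (fs ++ ts)
          = (fs ++ [x]) ++ ts := by
        rw [insertBy_append_not_before _ _ fs ts
          (by intro y hy; simp [hpx, hf y hy])]
        cases ts with
        | nil => simp [PySem.List.insertBy]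
        | cons t ts' =>
          have : p t = true := ht t (by simp)
          simp [PySem.List.insertBy, hpx, this]
      rw [hstep, ih (fs ++ [x]) ts
        (by intro y hy; rcases List.mem_append.1 hy with h | h
            · exact hf y h
            · simp at h; simpa [h]) ht]
      simp [hpx]

theorem sorted_boolkey_partition (xs : List Int) (p : Int → Bool) :
    PySem.List.sorted xs (fun x => if p x then (1:Int) else 0)
    = xs.filter (fun x => !p x) ++ xs.filter p := by
  rw [PySem.List.sorted_eq_foldl_insertBy]
  have := foldl_insertBy_boolkey p xs [] [] (by simp) (by simp)
  simpa using this

theorem move_elements_to_the_end_spec : Claim_equal_move_elements_to_the_end := by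
  intro numbers indexes _
  unfold Spec_move_elements_to_the_end move_elements_to_the_end move_elements_to_the_end_alt
  simp only []
  set idx := indexes.flatMap (fun tpl => [tpl.1, tpl.2]) with hidx
  set rng := PySem.List.pyRange 0 numbers.length 1 with hrng
  set g := fun i => PySem.List.pyGetD numbers i 0 with hg
  -- membership in the set equals membership in the flattened list
  have hmem : ∀ i : Int, PySem.Set.contains (PySem.Set.ofList idx) i = idx.contains i := by
    intro i
    by_cases h : i ∈ idx <;>
      simp [PySem.Set.mem_ofList, h]
  -- B's side: sort-by-0/1-key is the stable partition
  have hB : PySem.List.sorted rng (fun i => if PySem.Set.contains (PySem.Set.ofList idx) i then (1:Int) else 0)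
      = rng.filter (fun i => !idx.contains i) ++ rng.filter (fun i => idx.contains i) := by
    have := sorted_boolkey_partition rng (fun i => idx.contains i)
    simpa [hmem] using this
  -- A's side: the two-accumulator loop is two filters
  have hA : rng.foldl
      (fun (st : List Int × List Int) i =>
        if idx.contains i then (st.1, st.2 ++ [g i])
        else (st.1 ++ [g i], st.2)) ([], [])
      = ((rng.filter (fun i => !idx.contains i)).map g,
         (rng.filter (fun i => idx.contains i)).map g) := by
    induction rng with
    | nil => simp
    | cons r rs ih =>
      -- re-do with a general accumulator
      clear ih
      suffices h : ∀ (l : List Int) (a b : List Int),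
          l.foldl (fun (st : List Int × List Int) i =>
            if idx.contains i then (st.1, st.2 ++ [g i])
            else (st.1 ++ [g i], st.2)) (a, b)
          = (a ++ (l.filter (fun i => !idx.contains i)).map g,
             b ++ (l.filter (fun i => idx.contains i)).map g) by
        simpa using h (r :: rs) [] []
      intro l
      induction l with
      | nil => simp
      | cons x xs ih2 =>
        intro a b
        simp only [List.contains_eq_mem, decide_eq_true_eq] at ih2 ⊢
        by_cases hx : x ∈ idx <;>
          simp [List.foldl_cons, hx, ih2]
  rw [hA, hB]
  simp
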